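-- pv_equiv track=rewrite | github.com/BGMiralles/HackerRank-Algorithms-Challenges | fair_rations.py | fairRations
-- ===== SOURCE A (Python) =====
-- def fairRations(B):
--     c = 0
--     for i in range(len(B) - 1):
--         if B[i] % 2 != 0:
--             B[i+1] += 1
--             B[i] += 1
--             c += 2
--
--     if B[len(B)-1] % 2 != 0:
--         return("NO")
--     return str(c)
-- ===== SOURCE B (Python) =====
-- # Different algorithm: build the index table of odd-valued elements; consecutive odd indices
-- # pair up, and the answer is twice the alternating sum (-first + second - third + ...) of the
-- # table ("NO" iff the count of odd elements is odd).
-- # Return-value equivalence only: A mutates its argument in place, B does not.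
-- def fairRations(B):
--     odds = [i for i, x in enumerate(B) if x % 2 != 0]
--     if len(odds) % 2 != 0:
--         return "NO"
--     total = 0
--     sign = -1
--     for i in odds:
--         total += sign * i
--         sign = -sign
--     return str(2 * total)
-- ===== Notes on version B (the rewrite author's own statement) =====
-- stated objective: alternative
-- what changed: Replaces A's in-place carry sweep over adjacent elements with a staged algorithm: one pass collects the index table of odd-valued elements, a recursive helper pairs consecutive odd indices, and the answer is twice the sum of pair gaps ('NO' iff the odd count is odd); B does not mutate its argument (return-value equivalence).
import Mathlib
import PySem

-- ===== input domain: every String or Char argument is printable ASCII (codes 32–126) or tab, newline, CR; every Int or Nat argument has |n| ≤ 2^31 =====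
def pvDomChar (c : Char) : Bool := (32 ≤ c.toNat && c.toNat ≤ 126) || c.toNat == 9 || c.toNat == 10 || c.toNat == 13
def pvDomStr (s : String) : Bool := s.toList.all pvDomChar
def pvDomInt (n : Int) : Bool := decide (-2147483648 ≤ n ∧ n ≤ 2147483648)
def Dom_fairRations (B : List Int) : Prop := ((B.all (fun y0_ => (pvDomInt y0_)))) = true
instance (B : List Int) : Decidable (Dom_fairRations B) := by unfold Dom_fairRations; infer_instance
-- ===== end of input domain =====

-- B replaces A's in-place adjacent-increment sweep by an index-table algorithm: collect the indices
-- of odd elements; consecutive odd indices pair up and the answer is twice the alternating sum of the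
-- table ("NO" iff the count is odd).
-- Return-value equivalence only: A mutates its argument in place, B does not. Objective: alternative.

-- ===== PORT A =====
-- loop body of A: B[i+1] += 1; B[i] += 1; c += 2  (indices i, i+1 are always in range, so getD's default 0 is never used)
def fairStep (st : List Int × Int) (i : Nat) : List Int × Int :=
  if PySem.Int.mod (st.1.getD i 0) 2 ≠ 0 then
    let b1 := st.1.set (i + 1) (st.1.getD (i + 1) 0 + 1)
    let b2 := b1.set i (b1.getD i 0 + 1)
    (b2, st.2 + 2)
  else st

def fairRations (B : List Int) : String :=
  let st := (List.range (B.length - 1)).foldl fairStep (B, 0)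
  match PySem.List.pyGet? st.1 ((B.length : Int) - 1) with
  | none => ""   -- unreachable inside Pre_: Python raises IndexError here exactly when B = []
  | some v => if PySem.Int.mod v 2 ≠ 0 then "NO" else PySem.Int.toStr st.2

-- ===== PORT B =====
-- the list comprehension [i for i, x in enumerate(B) if x % 2 != 0]
def oddsFrom (L : List Int) : List Int :=
  ((PySem.List.enumerate L 0).filter (fun p => PySem.Int.mod p.2 2 != 0)).map Prod.fst

-- loop body of Source B: total += sign * i; sign = -sign
def sgnStep (st : Int × Int) (i : Int) : Int × Int := (st.1 + st.2 * i, -st.2)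

def fairRations_alt (B : List Int) : String :=
  let odds := oddsFrom B
  if odds.length % 2 ≠ 0 then "NO"
  else PySem.Int.toStr (2 * (odds.foldl sgnStep (0, -1)).1)

-- ===== PRECONDITION & SPEC =====
-- Pre_ excludes only the empty list, on which A raises IndexError reading the last element.
def Pre_fairRations (B : List Int) : Prop := B ≠ []
instance (B : List Int) : Decidable (Pre_fairRations B) := by unfold Pre_fairRations; infer_instance
def pvWitness_fairRations : List Int := ([1, 2, 3])

def Spec_fairRations (B : List Int) (out : String) : Prop := out = fairRations_alt B
instance (B : List Int) (out : String) : Decidable (Spec_fairRations B out) := by unfold Spec_fairRations; infer_instance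

-- ===== CLAIM (what is proved, stated in full; the proofs are below) =====
def Claim_equal_fairRations : Prop := ∀ (B : List Int), Dom_fairRations B → Pre_fairRations B → Spec_fairRations B (fairRations B)

-- ===== LEMMAS AND PROOFS =====

-- proof-side bridge: A's sweep carries exactly the running prefix-sum parity
def altStep (st : Int × Int) (x : Int) : Int × Int :=
  let odd := PySem.Int.mod (st.1 + x) 2
  (odd, st.2 + 2 * odd)

-- loop invariant: after k steps of A's sweep the state is the original tail with the carry added at
-- position k, some evened prefix E, and the altStep fold over the first k elements gives carry and count
lemma fair_inv (B : List Int) (k : Nat) (hk : k + 1 ≤ B.length) :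
    ∃ E : List Int, E.length = k ∧
      (List.range k).foldl fairStep (B, 0) =
        (E ++ (B.getD k 0 + ((B.take k).foldl altStep (0, 0)).1) :: B.drop (k + 1),
         ((B.take k).foldl altStep (0, 0)).2) := by
  induction k with
  | zero =>
    refine ⟨[], rfl, ?_⟩
    have h0 : 0 < B.length := by omega
    simp [List.getD_eq_getElem?_getD, h0, List.drop_one]
    conv_lhs => rw [show B = B.drop 0 from rfl, List.drop_eq_getElem_cons h0]
    simp [List.drop_one]
  | succ k ih =>
    obtain ⟨E, hE, hfold⟩ := ih (by omega)
    have hk1 : k < B.length := by omega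
    have hk2 : k + 1 < B.length := by omega
    set o : Int := ((B.take k).foldl altStep (0, 0)).1 with ho
    set c : Int := ((B.take k).foldl altStep (0, 0)).2 with hc
    set v : Int := B.getD k 0 + o with hv
    rw [List.range_succ, List.foldl_append, hfold]
    simp only [List.foldl_cons, List.foldl_nil]
    have htake : B.take (k + 1) = B.take k ++ [B[k]] := by
      rw [List.take_add_one, List.getElem?_eq_getElem hk1]
      rfl
    have hBk : B.getD k 0 = B[k] := by simp [List.getD_eq_getElem?_getD, hk1]
    have hBk1 : B.getD (k + 1) 0 = B[k + 1] := by simp [List.getD_eq_getElem?_getD, hk2]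
    have haltfold : (B.take (k + 1)).foldl altStep (0, 0) =
        (PySem.Int.mod (o + B[k]) 2, c + 2 * PySem.Int.mod (o + B[k]) 2) := by
      rw [htake, List.foldl_append]
      simp only [List.foldl_cons, List.foldl_nil]
      rfl
    have hgetk : ∀ D : List Int, (E ++ v :: D).getD k 0 = v := by
      intro D
      rw [List.getD_eq_getElem?_getD, List.getElem?_append_right (by omega), hE]
      simp
    have hget1 : ∀ (w : Int) (D : List Int), (E ++ v :: w :: D).getD (k + 1) 0 = w := by
      intro w D
      rw [List.getD_eq_getElem?_getD, List.getElem?_append_right (by omega), hE]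
      simp [show k + 1 - k = 1 by omega]
    have hset1 : ∀ (w a : Int) (D : List Int),
        (E ++ v :: w :: D).set (k + 1) a = E ++ v :: a :: D := by
      intro w a D
      rw [show k + 1 = E.length + 1 by omega]
      simp
    have hset2 : ∀ (a : Int) (D : List Int), (E ++ v :: D).set k a = E ++ a :: D := by
      intro a D
      rw [show k = E.length from hE.symm]
      simp
    have hdrop : B.drop (k + 1) = B[k + 1] :: B.drop (k + 2) := List.drop_eq_getElem_cons hk2
    have hcomm : PySem.Int.mod v 2 = PySem.Int.mod (o + B[k]) 2 := by
      rw [hv, hBk, Int.add_comm]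
    rw [haltfold, hdrop]
    simp only [fairStep, hgetk, hget1, hset1, hset2, hcomm, hBk1]
    by_cases hodd : PySem.Int.mod (o + B[k]) 2 ≠ 0
    · have h1 : PySem.Int.mod (o + B[k]) 2 = 1 := by
        rcases PySem.Int.mod_two_eq (o + B[k]) with h | h
        · exact absurd h hodd
        · exact h
      rw [if_pos hodd, h1]
      refine ⟨E ++ [v + 1], by simp [hE], ?_⟩
      simp only [Prod.mk.injEq]
      exact ⟨by simp, by ring⟩
    · have h0 : PySem.Int.mod (o + B[k]) 2 = 0 := not_not.mp hodd
      rw [if_neg hodd]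
      refine ⟨E ++ [v], by simp [hE], ?_⟩
      simp only [Prod.mk.injEq]
      exact ⟨by rw [h0]; simp, by rw [h0]; ring⟩

-- proof-side: pairSum l = sum of gaps of consecutive pairs of l
def pairSum : List Int → Int
  | a :: b :: t => b - a + pairSum t
  | _ => 0

-- the alternating-sum loop of B computes exactly the consecutive pair-gap sum on even-length lists
theorem signedFold : ∀ (l : List Int), l.length % 2 = 0 → ∀ t : Int,
    l.foldl sgnStep (t, -1) = (t + pairSum l, -1)
  | [], _, t => by simp [pairSum]
  | [x], h, _ => by simp at h
  | x :: y :: t', h, t => by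
    have ht : t'.length % 2 = 0 := by simp at h; omega
    simp only [List.foldl_cons, sgnStep, neg_neg]
    rw [signedFold t' ht]
    simp only [pairSum]
    refine congrArg₂ Prod.mk (by ring) rfl

-- … adds the gap of a trailing pair …
theorem pairSum_append_pair : ∀ (l : List Int), l.length % 2 = 0 → ∀ a b : Int,
    pairSum (l ++ [a, b]) = pairSum l + (b - a)
  | [], _, a, b => by simp [pairSum]
  | [x], h, _, _ => by simp at h
  | x :: y :: t, h, a, b => by
    have ht : t.length % 2 = 0 := by simp at h; omega
    simp only [List.cons_append, pairSum, pairSum_append_pair t ht a b]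
    ring

-- … and for an odd-length list, moving the closing element shifts the sum by the difference
theorem pairSum_close_shift : ∀ (l : List Int), l.length % 2 = 1 → ∀ m m' : Int,
    pairSum (l ++ [m']) = pairSum (l ++ [m]) + (m' - m)
  | [], h, _, _ => by simp at h
  | [x], _, m, m' => by simp only [List.cons_append, List.nil_append, pairSum]; ring
  | x :: y :: t, h, m, m' => by
    have ht : t.length % 2 = 1 := by simp at h; omega
    simp only [List.cons_append, pairSum, pairSum_close_shift t ht m m']
    ring

-- the pair sum closed at boundary n (pairs the last odd index with n when the count is odd)
def gclose (l : List Int) (n : Nat) : Int :=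
  if l.length % 2 = 1 then pairSum (l ++ [(n : Int)]) else pairSum l

lemma oddsFrom_append_single (L : List Int) (x : Int) :
    oddsFrom (L ++ [x]) =
      oddsFrom L ++ (if PySem.Int.mod x 2 ≠ 0 then [(L.length : Int)] else []) := by
  unfold oddsFrom
  rw [PySem.List.enumerate_append, List.filter_append, List.map_append]
  congr 1
  by_cases h : x % 2 = 1
  · simp [PySem.List.enumerate_cons, PySem.List.enumerate_nil, List.filter, h]
  · have h0 : x % 2 = 0 := by omega
    simp [PySem.List.enumerate_cons, PySem.List.enumerate_nil, List.filter, h0]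

-- characterization of the bridge fold: carry = parity of the number of odd elements so far,
-- count = twice the boundary-closed pair sum of their indices
lemma alt_char (L : List Int) :
    L.foldl altStep (0, 0) =
      ((((oddsFrom L).length % 2 : Nat) : Int), 2 * gclose (oddsFrom L) L.length) := by
  induction L using List.reverseRecOn with
  | nil => simp [oddsFrom, PySem.List.enumerate, gclose, pairSum]
  | append_singleton L x ih =>
    rw [List.foldl_append, ih]
    simp only [List.foldl_cons, List.foldl_nil, altStep]
    set odds := oddsFrom L with hodds
    set k := odds.length with hk
    have hOA := oddsFrom_append_single L x
    have hme : PySem.Int.mod x 2 = x % 2 := PySem.Int.mod_eq_emod_of_pos (by norm_num)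
    have hme2 : ∀ a : Int, PySem.Int.mod a 2 = a % 2 :=
      fun a => PySem.Int.mod_eq_emod_of_pos (by norm_num)
    rcases PySem.Int.mod_two_eq x with hx | hx
    · -- x even: odds unchanged
      have hOA2 : oddsFrom (L ++ [x]) = odds := by rw [hOA, hx, ← hodds]; norm_num
      have hpar : PySem.Int.mod (((k % 2 : Nat) : Int) + x) 2 = ((k % 2 : Nat) : Int) := by
        have hx' : x % 2 = 0 := by rw [← hme, hx]
        rw [hme2]; omega
      rw [hOA2, hpar, List.length_append, List.length_singleton]
      refine congrArg₂ Prod.mk rfl ?_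
      by_cases h1 : k % 2 = 1
      · simp only [gclose, ← hk, if_pos h1]
        have hb : ((L.length + 1 : Nat) : Int) = (L.length : Int) + 1 := by push_cast; ring
        rw [hb, pairSum_close_shift odds h1 ((L.length : Int)) ((L.length : Int) + 1), h1]
        push_cast
        ring
      · have h0 : k % 2 = 0 := by omega
        simp only [gclose, ← hk, if_neg (show ¬ k % 2 = 1 from by omega)]
        push_cast [h0]
        ring
    · -- x odd: odds gains index |L|
      have hOA2 : oddsFrom (L ++ [x]) = odds ++ [(L.length : Int)] := by
        rw [hOA, hx, ← hodds]; norm_num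
      rw [hOA2, List.length_append, List.length_singleton, List.length_append,
        List.length_singleton, ← hk]
      have hx' : x % 2 = 1 := by rw [← hme, hx]
      by_cases h1 : k % 2 = 1
      · have hpar : PySem.Int.mod (((k % 2 : Nat) : Int) + x) 2 = 0 := by rw [hme2]; omega
        rw [hpar]
        refine congrArg₂ Prod.mk ?_ ?_
        · rw [show (k + 1) % 2 = 0 from by omega]; norm_num
        · simp only [gclose, ← hk, List.length_append, List.length_singleton,
            if_pos h1, if_neg (show ¬ (k + 1) % 2 = 1 from by omega)]
          ring
      · have h0 : k % 2 = 0 := by omega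
        have hpar : PySem.Int.mod (((k % 2 : Nat) : Int) + x) 2 = 1 := by rw [hme2]; omega
        rw [hpar]
        refine congrArg₂ Prod.mk ?_ ?_
        · rw [show (k + 1) % 2 = 1 from by omega]; norm_num
        · simp only [gclose, ← hk, List.length_append, List.length_singleton,
            if_neg (show ¬ k % 2 = 1 from by omega),
            if_pos (show (k + 1) % 2 = 1 from by omega)]
          rw [List.append_assoc, show [(L.length : Int)] ++ [((L.length + 1 : Nat) : Int)] =
            [(L.length : Int), ((L.length + 1 : Nat) : Int)] from rfl,
            pairSum_append_pair odds h0]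
          push_cast
          ring

-- ===== VERDICT (by name: the statement is the Claim_ definition above) =====
theorem fairRations_spec : Claim_equal_fairRations := by
  intro B _ hPre
  have hn : 1 ≤ B.length := List.length_pos_iff.mpr hPre
  set n := B.length with hnn
  obtain ⟨E, hE, hfold⟩ := fair_inv B (n - 1) (by omega)
  have hdropn : B.drop (n - 1 + 1) = [] := by
    rw [show n - 1 + 1 = n by omega]; exact List.drop_length
  set P := B.take (n - 1) with hP
  have hPlen : P.length = n - 1 := by simp [hP]; omega
  set last : Int := B[n - 1]'(by omega) with hlast
  have hBdec : B = P ++ [last] := by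
    rw [hP, hlast]
    conv_lhs => rw [← List.take_append_drop (n - 1) B]
    congr 1
    rw [List.drop_eq_getElem_cons (show n - 1 < B.length by omega), hdropn]
  have hgetD : B.getD (n - 1) 0 = last := by
    simp [List.getD_eq_getElem?_getD,
      List.getElem?_eq_getElem (show n - 1 < B.length by omega), hlast]
  have hchar := alt_char P
  set odds := oddsFrom P with hodds
  set k := odds.length with hk
  have hOA := oddsFrom_append_single P last
  have hme2 : ∀ a : Int, PySem.Int.mod a 2 = a % 2 :=
    fun a => PySem.Int.mod_eq_emod_of_pos (by norm_num)
  show fairRations B = fairRations_alt B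
  unfold fairRations fairRations_alt
  rw [← hnn, hfold]
  simp only [hdropn]
  have hIdxA : ((n : Int) - 1) = ((E.length : Nat) : Int) := by rw [hE]; omega
  rw [hIdxA, PySem.List.pyGet?_append_length]
  simp only [hgetD, hchar, hPlen]
  rcases PySem.Int.mod_two_eq last with hle | hlo
  · -- last even: odds of B = odds of P
    have hOB : oddsFrom B = odds := by
      conv_lhs => rw [hBdec]
      rw [hOA, hle, ← hodds]; norm_num
    have hle' : last % 2 = 0 := by rw [← hme2, hle]
    rw [hOB, ← hk]
    by_cases h1 : k % 2 = 1
    · have hpar : PySem.Int.mod (last + ((k % 2 : Nat) : Int)) 2 = 1 := by rw [hme2]; omega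
      rw [hpar, if_pos (by norm_num), if_pos (by omega)]
    · have h0 : k % 2 = 0 := by omega
      have hpar : PySem.Int.mod (last + ((k % 2 : Nat) : Int)) 2 = 0 := by rw [hme2]; omega
      rw [hpar, if_neg (by norm_num), if_neg (by omega), signedFold odds (by omega) 0]
      simp only [gclose, ← hk, if_neg (show ¬ k % 2 = 1 from by omega), zero_add]
  · -- last odd: odds of B = odds of P ++ [n-1]
    have hOB : oddsFrom B = odds ++ [((n - 1 : Nat) : Int)] := by
      conv_lhs => rw [hBdec]
      rw [hOA, hlo, ← hodds, hPlen]; norm_num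
    have hlo' : last % 2 = 1 := by rw [← hme2, hlo]
    rw [hOB, List.length_append, List.length_singleton, ← hk]
    by_cases h1 : k % 2 = 1
    · have hpar : PySem.Int.mod (last + ((k % 2 : Nat) : Int)) 2 = 0 := by rw [hme2]; omega
      rw [hpar, if_neg (by norm_num), if_neg (show ¬ (k + 1) % 2 ≠ 0 from by omega),
        signedFold (odds ++ [((n - 1 : Nat) : Int)])
          (by rw [List.length_append, List.length_singleton, ← hk]; omega) 0]
      simp only [gclose, ← hk, if_pos h1, zero_add]
    · have h0 : k % 2 = 0 := by omega
      have hpar : PySem.Int.mod (last + ((k % 2 : Nat) : Int)) 2 = 1 := by rw [hme2]; omega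
      rw [hpar, if_pos (by norm_num), if_pos (show (k + 1) % 2 ≠ 0 from by omega)]
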